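-- pv_equiv track=rewrite | github.com/CoolAsTapatio/coding-lessons | skills/snake_printer.py | snake_printer
-- ===== SOURCE A (Python) =====
-- def snake_printer(number, snake):
-- 	if number == 0:
-- 		return snake + ":"
-- 	else:
-- 		if len(snake) % 2:
-- 			new_snake = snake + "\\"
-- 			new_number = number - 1
-- 			a  = snake_printer(new_number, new_snake)
-- 			return a
-- 		else:
-- 			new_snake = snake + "/"
-- 			new_number = number - 1
-- 			b = snake_printer(new_number, new_snake)
-- 			return b
-- ===== SOURCE B (Python) =====
-- def snake_printer(number, snake):
--     # closed form: the appended slashes strictly alternate, starting with "\" iff len(snake) is odd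
--     pattern = ("\\/" if len(snake) % 2 else "/\\") * number
--     return snake + pattern[:number] + ":"
-- ===== Notes on version B (the rewrite author's own statement) =====
-- stated objective: faster
-- what changed: Replaces A's one-character-per-call recursion with a closed form: the appended run strictly alternates, so B builds the whole pattern at once by string repetition and a slice.
-- outside the precondition, e.g. on snake_printer(-1, 'ab'): A raises RecursionError, B returns 'ab:'
import Mathlib
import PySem

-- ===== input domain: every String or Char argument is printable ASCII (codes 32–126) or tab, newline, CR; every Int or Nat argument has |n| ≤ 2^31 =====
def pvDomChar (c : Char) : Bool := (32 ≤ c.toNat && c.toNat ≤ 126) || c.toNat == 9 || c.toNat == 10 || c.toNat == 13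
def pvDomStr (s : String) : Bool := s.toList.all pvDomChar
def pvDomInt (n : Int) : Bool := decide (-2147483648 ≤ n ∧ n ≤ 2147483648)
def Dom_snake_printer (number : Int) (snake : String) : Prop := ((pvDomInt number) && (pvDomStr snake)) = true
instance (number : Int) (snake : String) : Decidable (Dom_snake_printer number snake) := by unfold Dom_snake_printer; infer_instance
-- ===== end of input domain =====

-- B replaces A's one-char-per-call recursion with a closed form (alternating pattern built by repetition + slice).
-- Pre_ excludes negative `number`, on which Python A recurses forever (RecursionError).


-- ===== PORT A =====
-- fuel = number.toNat: on Pre_ (0 ≤ number) this is exactly A's recursion on `number`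
def snakeA_go : Nat → List Char → List Char
  | 0, s => s ++ [':']
  | n+1, s =>
      if s.length % 2 = 1 then snakeA_go n (s ++ ['\\'])
      else snakeA_go n (s ++ ['/'])

def snake_printer (number : Int) (snake : String) : String :=
  String.ofList (snakeA_go number.toNat snake.toList)

-- ===== PORT B =====
-- Python `s * number` (empty for number ≤ 0)
def pyStrTimes (s : List Char) (n : Int) : List Char :=
  (List.replicate n.toNat s).flatten

def snake_printer_alt (number : Int) (snake : String) : String :=
  let start : List Char := if snake.toList.length % 2 = 1 then ['\\', '/'] else ['/', '\\']
  let pattern : List Char := pyStrTimes start number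
  String.ofList (snake.toList ++ PySem.List.slice pattern none (some number) ++ [':'])

-- ===== PRECONDITION & SPEC =====
-- Pre_: Python A recurses forever (RecursionError) when number < 0.
def Pre_snake_printer (number : Int) (snake : String) : Prop := 0 ≤ number
instance (number : Int) (snake : String) : Decidable (Pre_snake_printer number snake) := by
  unfold Pre_snake_printer; infer_instance
def pvWitness_snake_printer : Int × String := (5, "ab")

def Spec_snake_printer (number : Int) (snake : String) (out : String) : Prop := out = snake_printer_alt number snake
instance (number : Int) (snake : String) (out : String) : Decidable (Spec_snake_printer number snake out) := by unfold Spec_snake_printer; infer_instance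

-- ===== CLAIM (what is proved, stated in full; the proofs are below) =====
def Claim_equal_snake_printer : Prop := ∀ (number : Int) (snake : String), Dom_snake_printer number snake → Pre_snake_printer number snake → Spec_snake_printer number snake (snake_printer number snake)

-- ===== LEMMAS AND PROOFS =====

-- n characters alternating a, b, a, b, …
def altChars (a b : Char) : Nat → List Char
  | 0 => []
  | n+1 => a :: altChars b a n

theorem snakeA_go_eq (n : Nat) : ∀ (s : List Char),
    snakeA_go n s =
      s ++ (if s.length % 2 = 1 then altChars '\\' '/' n else altChars '/' '\\' n) ++ [':'] := by
  induction n with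
  | zero => intro s; simp [snakeA_go, altChars]
  | succ n ih =>
    intro s
    by_cases h : s.length % 2 = 1
    · simp [snakeA_go, h, ih, altChars]
      intro hc; omega
    · simp [snakeA_go, h, ih, altChars]
      intro hc; omega

theorem take_flatten_replicate (a b : Char) :
    ∀ (m n : Nat), n ≤ 2 * m →
      List.take n (List.replicate m [a, b]).flatten = altChars a b n := by
  intro m
  induction m generalizing a b with
  | zero => intro n hn; interval_cases n; simp [altChars]
  | succ m ih =>
    intro n hn
    match n with
    | 0 => simp [altChars]
    | 1 => simp [List.replicate_succ, altChars]
    | k+2 =>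
      have : k ≤ 2 * m := by omega
      simp [List.replicate_succ, altChars, ih a b k this]

-- ===== VERDICT =====
theorem snake_printer_spec : Claim_equal_snake_printer := by
  intro number snake _ hpre
  unfold Spec_snake_printer snake_printer snake_printer_alt pyStrTimes
  dsimp only
  rw [PySem.List.slice_to, snakeA_go_eq]
  by_cases h : snake.toList.length % 2 = 1
  · rw [if_pos h, if_pos h, take_flatten_replicate _ _ _ _ (by omega)]
  · rw [if_neg h, if_neg h, take_flatten_replicate _ _ _ _ (by omega)]
  · exact hpre
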